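-- pv_equiv track=rewrite | github.com/dannyjdalzell/splits-feed | scripts/ingest_twitter_csv.py | choose_pair_from_hits
-- ===== SOURCE A (Python) =====
-- from collections import defaultdict, Counter
--
-- def choose_pair_from_hits(hits, league_hint=None):
--     """
--     hits: list[(team, league, pos)]
--     league_hint: optional string like 'NFL' to bias selection
--     strategy:
--       1) if league_hint present and >=2 teams of that league exist → use that league’s first 2.
--       2) otherwise pick dominant league by count; use first 2 teams of that league.
--       3) if a clear pair still not possible (tie across leagues), return None (drop) to avoid cross-sport garbage.
--     """
--     if not hits or len(hits) < 2:
--         return None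
--
--     by_league = defaultdict(list)
--     for t, lg, pos in hits:
--         by_league[lg].append((t, pos))
--
--     if league_hint and league_hint in by_league and len(by_league[league_hint]) >= 2:
--         arr = sorted(by_league[league_hint], key=lambda x: x[1])[:2]
--         return arr[0][0], arr[1][0], league_hint, "HINT_DOMINANT"
--
--     counts = {lg: len(arr) for lg, arr in by_league.items()}
--     if not counts:
--         return None
--
--     # dominant league by count; tie-breaker = earliest second-team position
--     dominant, _ = max(counts.items(), key=lambda kv: kv[1])
--     # tie handling
--     tied = [lg for lg, c in counts.items() if c == counts[dominant]]
--     if len(tied) > 1: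
--         # try to break ties by earliest positions of the second team
--         def second_pos(lg):
--             arr = sorted(by_league[lg], key=lambda x: x[1])
--             if len(arr) >= 2:
--                 return arr[1][1]
--             return 10**9
--         dominant = min(tied, key=second_pos)
--
--     if len(by_league[dominant]) >= 2:
--         arr = sorted(by_league[dominant], key=lambda x: x[1])[:2]
--         return arr[0][0], arr[1][0], dominant, "DOMINANT_LEAGUE"
--     return None
-- ===== SOURCE B (Python) =====
-- def choose_pair_from_hits(hits, league_hint=None):
--     # One pass over hits: per league keep a count and the two entries with
--     # smallest pos (stable: later equal-pos entries go after), then one scan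
--     # picks the dominant league by (max count, min second-pos, first inserted).
--     if len(hits) < 2:
--         return None
--
--     stats = {}  # league -> (count, top2) with top2 the first-two of the stable pos-sort
--     for t, lg, pos in hits:
--         c, top2 = stats.get(lg, (0, []))
--         stats[lg] = (c + 1, _ins2(top2, t, pos))
--
--     if league_hint and league_hint in stats and stats[league_hint][0] >= 2:
--         top2 = stats[league_hint][1]
--         return top2[0][0], top2[1][0], league_hint, "HINT_DOMINANT"
--
--     best = None  # (league, count, second_pos)
--     for lg, (c, top2) in stats.items():
--         sp = top2[1][1] if len(top2) >= 2 else 10**9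
--         if best is None or best[1] < c or (c == best[1] and sp < best[2]):
--             best = (lg, c, sp)
--
--     if best is not None and best[1] >= 2:
--         lg = best[0]
--         top2 = stats[lg][1]
--         return top2[0][0], top2[1][0], lg, "DOMINANT_LEAGUE"
--     return None
--
--
-- def _ins2(top2, t, pos):
--     # insert (t, pos) into the (<=2)-element pos-ordered list, keep two
--     if not top2:
--         return [(t, pos)]
--     b0 = top2[0]
--     if pos < b0[1]:
--         return [(t, pos), b0]
--     rest = top2[1:]
--     if not rest:
--         return [b0, (t, pos)]
--     b1 = rest[0]
--     return [b0, (t, pos)] if pos < b1[1] else [b0, b1]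
-- ===== Notes on version B (the rewrite author's own statement) =====
-- stated objective: alternative
-- what changed: Replaces the dict-of-lists grouping with per-league sorts plus the max/filter/min tie-break cascade by one pass that maintains per league only a count and the two smallest-pos entries, and one scan that picks the dominant league lexicographically by (count, second-pos, first inserted).
import Mathlib
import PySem

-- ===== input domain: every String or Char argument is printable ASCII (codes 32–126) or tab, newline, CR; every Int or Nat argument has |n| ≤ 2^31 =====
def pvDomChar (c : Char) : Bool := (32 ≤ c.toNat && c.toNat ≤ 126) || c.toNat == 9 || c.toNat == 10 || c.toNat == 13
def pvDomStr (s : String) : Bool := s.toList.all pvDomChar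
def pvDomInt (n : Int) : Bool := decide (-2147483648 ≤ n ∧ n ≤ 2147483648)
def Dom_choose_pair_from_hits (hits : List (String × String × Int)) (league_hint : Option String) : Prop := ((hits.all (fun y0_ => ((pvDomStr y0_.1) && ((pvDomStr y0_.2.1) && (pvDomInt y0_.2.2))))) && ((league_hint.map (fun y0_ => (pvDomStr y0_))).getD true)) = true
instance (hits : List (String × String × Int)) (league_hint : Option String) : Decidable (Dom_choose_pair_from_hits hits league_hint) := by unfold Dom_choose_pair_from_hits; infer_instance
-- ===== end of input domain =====

-- B replaces the per-league grouping + repeated sorts + max/filter/min cascade by a single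
-- pass keeping per league (count, two smallest-pos entries) and a single lexicographic scan;
-- same value everywhere (alternative algorithm, similar cost).

-- ===== PORT A =====
-- by_league = defaultdict(list); for t, lg, pos in hits: by_league[lg].append((t, pos))
def pvGroupA (hits : List (String × String × Int)) : PySem.Dict String (List (String × Int)) :=
  hits.foldl (fun d h => d.modify h.2.1 [] (fun arr => arr ++ [(h.1, h.2.2)])) PySem.Dict.empty

-- def second_pos(lg): arr = sorted(by_league[lg], key=...); return arr[1][1] if len(arr) >= 2 else 10**9
def pvSecondPos (by_league : PySem.Dict String (List (String × Int))) (lg : String) : Int :=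
  match PySem.List.sorted (by_league.getD lg []) (fun x => x.2) with
  | _ :: b :: _ => b.2
  | _ => 10 ^ 9

def choose_pair_from_hits (hits : List (String × String × Int)) (league_hint : Option String) : Option (String × String × String × String) :=
  if hits.length < 2 then none else
  let by_league := pvGroupA hits
  let hintStr := league_hint.getD ""   -- `league_hint and …`: None and "" are falsy
  if (!(hintStr == "") && by_league.contains hintStr && decide (2 ≤ (by_league.getD hintStr []).length)) then
    match PySem.List.sorted (by_league.getD hintStr []) (fun x => x.2) with
    | a :: b :: _ => some (a.1, b.1, hintStr, "HINT_DOMINANT")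
    | _ => none
  else
    let counts := by_league.items.map (fun p => (p.1, (p.2.length : Int)))
    if counts.isEmpty then none else
    match PySem.List.max? counts (fun kv => kv.2) with
    | none => none   -- unreachable: counts ≠ []
    | some dom0 =>
      let maxc := (PySem.Dict.mk counts).getD dom0.1 0   -- counts[dominant]
      let tied := (counts.filter (fun kv => kv.2 == maxc)).map (fun kv => kv.1)
      let dominant :=
        if 1 < tied.length then
          match PySem.List.min? tied (fun lg => pvSecondPos by_league lg) with
          | some d => d
          | none => dom0.1   -- unreachable: tied ≠ []
        else dom0.1
      if 2 ≤ (by_league.getD dominant []).length then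
        match PySem.List.sorted (by_league.getD dominant []) (fun x => x.2) with
        | a :: b :: _ => some (a.1, b.1, dominant, "DOMINANT_LEAGUE")
        | _ => none
      else none

-- ===== PORT B =====
-- _ins2: insert (t, pos) into the ≤2-element pos-ordered list, keep two
def pvIns2 (top2 : List (String × Int)) (t : String) (pos : Int) : List (String × Int) :=
  match top2 with
  | [] => [(t, pos)]
  | b0 :: rest =>
    if pos < b0.2 then [(t, pos), b0]
    else
      match rest with
      | [] => [b0, (t, pos)]
      | b1 :: _ => if pos < b1.2 then [b0, (t, pos)] else [b0, b1]

-- stats: league -> (count, top2), built in one pass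
def pvStats (hits : List (String × String × Int)) : PySem.Dict String (Int × List (String × Int)) :=
  hits.foldl
    (fun d h => d.modify h.2.1 ((0 : Int), ([] : List (String × Int)))
      (fun s => (s.1 + 1, pvIns2 s.2 h.1 h.2.2)))
    PySem.Dict.empty

-- sp = top2[1][1] if len(top2) >= 2 else 10**9
def pvSp (top2 : List (String × Int)) : Int :=
  match top2 with
  | _ :: b :: _ => b.2
  | _ => 10 ^ 9

-- one step of the best-league scan
def pvBestStep (best : Option (String × Int × Int)) (e : String × Int × List (String × Int)) : Option (String × Int × Int) :=
  let sp := pvSp e.2.2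
  match best with
  | none => some (e.1, e.2.1, sp)
  | some b => if b.2.1 < e.2.1 || (e.2.1 == b.2.1 && decide (sp < b.2.2)) then some (e.1, e.2.1, sp) else some b

def choose_pair_from_hits_alt (hits : List (String × String × Int)) (league_hint : Option String) : Option (String × String × String × String) :=
  if hits.length < 2 then none else
  let stats := pvStats hits
  let hintStr := league_hint.getD ""
  if (!(hintStr == "") && stats.contains hintStr && decide (2 ≤ (stats.getD hintStr ((0 : Int), [])).1)) then
    match (stats.getD hintStr ((0 : Int), [])).2 with
    | a :: b :: _ => some (a.1, b.1, hintStr, "HINT_DOMINANT")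
    | _ => none
  else
    match stats.items.foldl pvBestStep none with
    | none => none
    | some best =>
      if 2 ≤ best.2.1 then
        match (stats.getD best.1 ((0 : Int), [])).2 with
        | a :: b :: _ => some (a.1, b.1, best.1, "DOMINANT_LEAGUE")
        | _ => none
      else none

-- ===== PRECONDITION & SPEC =====
def Spec_choose_pair_from_hits (hits : List (String × String × Int)) (league_hint : Option String) (out : Option (String × String × String × String)) : Prop := out = choose_pair_from_hits_alt hits league_hint
instance (hits : List (String × String × Int)) (league_hint : Option String) (out : Option (String × String × String × String)) : Decidable (Spec_choose_pair_from_hits hits league_hint out) := by unfold Spec_choose_pair_from_hits; infer_instance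

-- ===== CLAIM (what is proved, stated in full; the proofs are below) =====
def Claim_equal_choose_pair_from_hits : Prop := ∀ (hits : List (String × String × Int)) (league_hint : Option String), Dom_choose_pair_from_hits hits league_hint → Spec_choose_pair_from_hits hits league_hint (choose_pair_from_hits hits league_hint)

-- ===== LEMMAS AND PROOFS =====

-- abbreviations used only by the proofs
def pvCnt (hits : List (String × String × Int)) (k : String) : Int :=
  (((pvGroupA hits).getD k []).length : Int)
def pvSpOf (hits : List (String × String × Int)) (k : String) : Int :=
  pvSecondPos (pvGroupA hits) k
-- "a beats m" in B's lexicographic scan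
def pvBeats (hits : List (String × String × Int)) (a m : String) : Bool :=
  decide (pvCnt hits m < pvCnt hits a) ||
    (pvCnt hits a == pvCnt hits m && decide (pvSpOf hits a < pvSpOf hits m))

-- generic first-best selection fold
def pvSel {α : Type} (b : α → α → Bool) (K : List α) (d : α) : α :=
  K.foldl (fun m k => if b k m then k else m) d

theorem pvSel_mem {α : Type} (b : α → α → Bool) (K : List α) (d : α) :
    pvSel b K d = d ∨ pvSel b K d ∈ K := by
  induction K generalizing d with
  | nil => exact Or.inl rfl
  | cons k K ih =>
    have hstep : pvSel b (k :: K) d = pvSel b K (if b k d then k else d) := rfl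
    rw [hstep]
    cases hkd : b k d with
    | true =>
      rw [if_pos rfl]
      rcases ih k with h | h
      · exact Or.inr (by simp [h])
      · exact Or.inr (List.mem_cons_of_mem _ h)
    | false =>
      rw [if_neg (by simp)]
      rcases ih d with h | h
      · exact Or.inl h
      · exact Or.inr (List.mem_cons_of_mem _ h)

theorem pvSel_not {α : Type} (b : α → α → Bool)
    (H0 : ∀ x, b x x = false)
    (H1 : ∀ x y z, b x y = true → b y z = true → b x z = true)
    (H2 : ∀ x y z, b x y = false → b x z = true → b y z = true) :
    ∀ (K : List α) (d y : α), (y = d ∨ y ∈ K) → b y (pvSel b K d) = false := by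
  intro K
  induction K with
  | nil =>
    intro d y hy
    rcases hy with rfl | h
    · exact H0 y
    · cases h
  | cons k K ih =>
    intro d y hy
    have hstep : pvSel b (k :: K) d = pvSel b K (if b k d then k else d) := rfl
    rw [hstep]
    cases hkd : b k d with
    | true =>
      rw [if_pos rfl]
      rcases hy with rfl | hy
      · -- y = d
        cases hdr : b y (pvSel b K k) with
        | false => rfl
        | true =>
          have hkr : b k (pvSel b K k) = true := H1 k y _ hkd hdr
          rw [ih k k (Or.inl rfl)] at hkr; cases hkr
      · rcases List.mem_cons.mp hy with rfl | hy
        · exact ih y y (Or.inl rfl)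
        · exact ih k y (Or.inr hy)
    | false =>
      rw [if_neg (by simp)]
      rcases hy with rfl | hy
      · exact ih y y (Or.inl rfl)
      · rcases List.mem_cons.mp hy with rfl | hy
        · -- y = k
          cases hkr : b y (pvSel b K d) with
          | false => rfl
          | true =>
            have hdr : b d (pvSel b K d) = true := H2 y d _ hkd hkr
            rw [ih d d (Or.inl rfl)] at hdr; cases hdr
        · exact ih d y (Or.inr hy)

theorem pvSel_first {α : Type} (b : α → α → Bool)
    (H1 : ∀ x y z, b x y = true → b y z = true → b x z = true)
    (H3 : ∀ x y z, b x y = true → b z y = false → b x z = true) :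
    ∀ (K : List α) (d : α), ∃ pre suf, d :: K = pre ++ (pvSel b K d) :: suf ∧
      ∀ y ∈ pre, b (pvSel b K d) y = true := by
  intro K
  induction K with
  | nil =>
    intro d
    exact ⟨[], [], rfl, by simp⟩
  | cons k K ih =>
    intro d
    have hstep : pvSel b (k :: K) d = pvSel b K (if b k d then k else d) := rfl
    rw [hstep]
    cases hkd : b k d with
    | true =>
      rw [if_pos rfl]
      obtain ⟨pre', suf', heq, hpre⟩ := ih k
      refine ⟨d :: pre', suf', by rw [List.cons_append, ← heq], ?_⟩
      intro y hy
      rcases List.mem_cons.mp hy with rfl | hy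
      · -- y is the old start d; the selected element beats it via k
        rcases pre' with _ | ⟨p0, ptl⟩
        · simp only [List.nil_append] at heq
          have hrk : pvSel b K k = k := by injection heq with h1 _; exact h1.symm
          rw [hrk]; exact hkd
        · have hp0 : p0 = k := by injection heq with h1 _; exact h1.symm
          have hrk : b (pvSel b K k) k = true := hpre k (by rw [← hp0]; exact List.mem_cons_self)
          exact H1 _ k y hrk hkd
      · exact hpre y hy
    | false =>
      rw [if_neg (by simp)]
      obtain ⟨pre', suf', heq, hpre⟩ := ih d
      rcases pre' with _ | ⟨p0, ptl⟩
      · simp only [List.nil_append] at heq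
        have hrd : pvSel b K d = d := by injection heq with h1 _; exact h1.symm
        exact ⟨[], k :: K, by rw [hrd]; simp, by simp⟩
      · have hpair := List.cons_eq_cons.mp heq
        have hp0 : p0 = d := hpair.1.symm
        have hK : K = ptl ++ (pvSel b K d) :: suf' := hpair.2
        refine ⟨d :: k :: ptl, suf', by simp only [List.cons_append]; rw [← hK], ?_⟩
        intro y hy
        have hrd : b (pvSel b K d) d = true := hpre d (by rw [← hp0]; exact List.mem_cons_self)
        rcases List.mem_cons.mp hy with rfl | hy
        · exact hrd
        · rcases List.mem_cons.mp hy with rfl | hy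
          · exact H3 _ d y hrd hkd
          · exact hpre y (List.mem_cons_of_mem _ hy)

theorem pvSel_unique {α : Type} (b : α → α → Bool) (L : List α) (r r' : α)
    (pre suf pre' suf' : List α)
    (hL : L = pre ++ r :: suf) (hL' : L = pre' ++ r' :: suf')
    (hnb : ∀ y ∈ L, b y r = false) (hnb' : ∀ y ∈ L, b y r' = false)
    (hb : ∀ y ∈ pre, b r y = true) (hb' : ∀ y ∈ pre', b r' y = true) : r = r' := by
  have heq : pre ++ r :: suf = pre' ++ r' :: suf' := by rw [← hL, ← hL']
  rcases List.append_eq_append_iff.mp heq with ⟨as, h1, h2⟩ | ⟨bs, h1, h2⟩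
  · rcases as with _ | ⟨a, as'⟩
    · exact (List.cons_eq_cons.mp (by simpa using h2)).1
    · have hra : r = a := (List.cons_eq_cons.mp h2).1
      have hrpre' : r ∈ pre' := by
        rw [h1, hra]; exact List.mem_append_right _ List.mem_cons_self
      have h1' : b r' r = true := hb' r hrpre'
      have h2' : b r' r = false := hnb r' (by rw [hL']; exact List.mem_append_right _ List.mem_cons_self)
      rw [h1'] at h2'; cases h2'
  · rcases bs with _ | ⟨a, as'⟩
    · exact ((List.cons_eq_cons.mp (by simpa using h2)).1).symm
    · have hra : r' = a := (List.cons_eq_cons.mp h2).1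
      have hrpre : r' ∈ pre := by
        rw [h1, hra]; exact List.mem_append_right _ List.mem_cons_self
      have h1' : b r r' = true := hb r' hrpre
      have h2' : b r r' = false := hnb' r (by rw [hL]; exact List.mem_append_right _ List.mem_cons_self)
      rw [h1'] at h2'; cases h2'

-- ---- characterization of the two dicts ----

theorem groupA_getD (hits : List (String × String × Int)) (lg : String) :
    (pvGroupA hits).getD lg [] =
      (hits.filter (fun h => h.2.1 == lg)).map (fun h => (h.1, h.2.2)) := by
  unfold pvGroupA
  have h1 : hits.foldl (fun d h => d.modify h.2.1 [] (fun arr => arr ++ [(h.1, h.2.2)])) PySem.Dict.empty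
      = (hits.map (fun h => (h.2.1, (h.1, h.2.2)))).foldl (fun d p => d.modify p.1 [] (fun arr => arr ++ [p.2])) PySem.Dict.empty := by
    rw [List.foldl_map]
  rw [h1, PySem.Dict.getD_foldl_modify_append]
  simp [List.filter_map, Function.comp_def]

theorem getD_foldl_modify_key_fold {ν β : Type} (l : List β) (key : β → String) (d0 : ν)
    (step : β → ν → ν) (d : PySem.Dict String ν) (c : String) :
    (l.foldl (fun d p => d.modify (key p) d0 (fun v => step p v)) d).getD c d0 =
      (l.filter (fun p => key p == c)).foldl (fun v p => step p v) (d.getD c d0) := by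
  induction l generalizing d with
  | nil => simp
  | cons p l ih =>
    simp only [List.foldl_cons, List.filter_cons]
    rw [ih]
    by_cases hc : (key p == c) = true
    · have hceq : c = key p := (beq_iff_eq.mp hc).symm
      rw [PySem.Dict.getD_modify]
      simp [hc, if_pos hceq]
      rw [hceq]
    · have hcne : ¬ c = key p := fun h => hc (by simp [h])
      rw [PySem.Dict.getD_modify]
      simp [hc, if_neg hcne]

theorem take2_insertBy (l : List (String × Int)) (t : String) (pos : Int) :
    (PySem.List.insertBy (fun a b => decide (a.2 < b.2)) (t, pos) l).take 2 =
      pvIns2 (l.take 2) t pos := by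
  match l with
  | [] => rfl
  | [b0] =>
    simp only [PySem.List.insertBy, pvIns2, List.take]
    by_cases h : pos < b0.2
    · simp [h]
    · simp [h]
  | b0 :: b1 :: tl =>
    simp only [PySem.List.insertBy, pvIns2, List.take]
    by_cases h0 : pos < b0.2
    · simp [h0]
    · by_cases h1 : pos < b1.2
      · simp [h0, h1]
      · simp [h0, h1]

theorem sorted_append_singleton (A : List (String × Int)) (x : String × Int) :
    PySem.List.sorted (A ++ [x]) (fun p => p.2) =
      PySem.List.insertBy (fun a b => decide (a.2 < b.2)) x (PySem.List.sorted A (fun p => p.2)) := by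
  rw [PySem.List.sorted_eq_foldl_insertBy, PySem.List.sorted_eq_foldl_insertBy, List.foldl_append]
  simp

theorem fold_stats_val (F : List (String × String × Int)) :
    F.foldl (fun v h => (v.1 + 1, pvIns2 v.2 h.1 h.2.2)) ((0 : Int), ([] : List (String × Int)))
      = ((F.length : Int), (PySem.List.sorted (F.map (fun h => (h.1, h.2.2))) (fun x => x.2)).take 2) := by
  induction F using List.reverseRecOn with
  | nil => rfl
  | append_singleton F x ih =>
    rw [List.foldl_append, ih]
    simp only [List.foldl_cons, List.foldl_nil, List.map_append, List.map_cons, List.map_nil]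
    rw [sorted_append_singleton, take2_insertBy]
    simp

theorem stats_getD (hits : List (String × String × Int)) (lg : String) :
    (pvStats hits).getD lg ((0 : Int), []) =
      (pvCnt hits lg, (PySem.List.sorted ((pvGroupA hits).getD lg []) (fun x => x.2)).take 2) := by
  unfold pvStats
  have := getD_foldl_modify_key_fold hits (fun h => h.2.1) ((0 : Int), ([] : List (String × Int)))
    (fun h s => (s.1 + 1, pvIns2 s.2 h.1 h.2.2)) PySem.Dict.empty lg
  rw [this]
  rw [PySem.Dict.getD_empty]
  rw [fold_stats_val]
  rw [groupA_getD]
  simp [pvCnt, groupA_getD]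

theorem keys_stats_eq (hits : List (String × String × Int)) :
    (pvStats hits).keys = (pvGroupA hits).keys := by
  unfold pvStats pvGroupA
  rw [PySem.Dict.keys_foldl_modify_key hits (fun h => h.2.1) _ (fun _ h => (fun s => (s.1 + 1, pvIns2 s.2 h.1 h.2.2))) PySem.Dict.empty,
      PySem.Dict.keys_foldl_modify_key hits (fun h => h.2.1) _ (fun _ h => (fun arr => arr ++ [(h.1, h.2.2)])) PySem.Dict.empty]
  rfl

theorem nodup_keys_groupA (hits : List (String × String × Int)) :
    (pvGroupA hits).keys.Nodup := by
  unfold pvGroupA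
  exact PySem.Dict.nodup_keys_foldl_modify_key hits (fun h => h.2.1) _ _ _ (by simp [PySem.Dict.keys_empty])

theorem keys_groupA_ne_nil (hits : List (String × String × Int)) (h : hits ≠ []) :
    (pvGroupA hits).keys ≠ [] := by
  unfold pvGroupA
  rw [PySem.Dict.keys_foldl_modify_key hits (fun h => h.2.1) _ (fun _ h => (fun arr => arr ++ [(h.1, h.2.2)])) PySem.Dict.empty]
  rw [PySem.Dict.keys_empty, PySem.Set.update_nil_left]
  rcases hits with _ | ⟨h0, tl⟩
  · exact absurd rfl h
  · intro hnil
    have hm : h0.2.1 ∈ PySem.Set.ofList ((h0 :: tl).map (fun h => h.2.1)) :=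
      (PySem.Set.mem_ofList _ _).mpr (by simp)
    rw [hnil] at hm
    cases hm

-- ---- selection-side helper lemmas ----

theorem pvSp_take2 (s : List (String × Int)) : pvSp (s.take 2) = pvSp s := by
  match s with
  | [] => rfl
  | [a] => rfl
  | a :: b :: t => rfl

theorem getD_mk_map (K : List String) (f : String → Int) (k : String) (hk : k ∈ K) :
    (PySem.Dict.mk (K.map (fun k => (k, f k)))).getD k 0 = f k := by
  induction K with
  | nil => cases hk
  | cons a K ih =>
    rw [PySem.Dict.getD_eq_get?_getD]
    simp only [List.map_cons]
    rw [PySem.Dict.get?_mk_cons]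
    by_cases hak : (a == k) = true
    · simp [(beq_iff_eq.mp hak)]
    · have hne : k ≠ a := fun h => hak (by simp [h])
      rw [if_neg (by simp [hak])]
      rw [← PySem.Dict.getD_eq_get?_getD]
      exact ih (List.mem_of_ne_of_mem hne hk)

theorem fold_emb_aux {α β : Type} (step : Option β → α → Option β) (emb : α → β) (b : α → α → Bool)
    (hstep : ∀ m k, step (some (emb m)) k = some (emb (if b k m then k else m))) :
    ∀ (rest : List α) (d : α), rest.foldl step (some (emb d)) = some (emb (pvSel b rest d)) := by
  intro rest
  induction rest with
  | nil => intro d; rfl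
  | cons k rest ih =>
    intro d
    have hsel : pvSel b (k :: rest) d = pvSel b rest (if b k d then k else d) := rfl
    rw [hsel, List.foldl_cons, hstep]
    exact ih (if b k d then k else d)

theorem min?_cons (sp : String → Int) (t0 : String) (trest : List String) :
    PySem.List.min? (t0 :: trest) sp = some (pvSel (fun a m => decide (sp a < sp m)) trest t0) := by
  show (t0 :: trest).foldl _ none = _
  rw [List.foldl_cons]
  exact fold_emb_aux _ (fun x => x) (fun a m => decide (sp a < sp m))
    (fun m k => by
      show (if sp k < sp m then some k else some m) = _
      by_cases h : sp k < sp m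
      · rw [if_pos h, if_pos (by simp [h])]
      · rw [if_neg h, if_neg (by simp [h])]) trest t0

theorem max?_map (f : String → Int) (k0 : String) (rest : List String) :
    PySem.List.max? ((k0 :: rest).map (fun k => (k, f k))) (fun kv => kv.2)
      = some (pvSel (fun a m => decide (f m < f a)) rest k0,
              f (pvSel (fun a m => decide (f m < f a)) rest k0)) := by
  show ((k0 :: rest).map (fun k => (k, f k))).foldl _ none = _
  rw [List.map_cons, List.foldl_cons, List.foldl_map]
  exact fold_emb_aux _ (fun k => (k, f k)) (fun a m => decide (f m < f a))
    (fun m k => by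
      show (if f m < f k then some (k, f k) else some (m, f m)) = _
      by_cases h : f m < f k
      · rw [if_pos h, if_pos (by simp [h])]
      · rw [if_neg h, if_neg (by simp [h])]) rest k0

-- pvBeats is a strict lexicographic comparison
theorem pvBeats_irrefl (hits : List (String × String × Int)) (x : String) :
    pvBeats hits x x = false := by
  simp [pvBeats]

theorem pvBeats_trans (hits : List (String × String × Int)) (x y z : String)
    (h1 : pvBeats hits x y = true) (h2 : pvBeats hits y z = true) : pvBeats hits x z = true := by
  simp only [pvBeats, Bool.or_eq_true, Bool.and_eq_true, decide_eq_true_eq, beq_iff_eq] at h1 h2 ⊢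
  omega

theorem pvBeats_cotrans (hits : List (String × String × Int)) (x y z : String)
    (h1 : pvBeats hits x y = false) (h2 : pvBeats hits x z = true) : pvBeats hits y z = true := by
  have h1' : ¬ (pvBeats hits x y = true) := by simp [h1]
  simp only [pvBeats, Bool.or_eq_true, Bool.and_eq_true, decide_eq_true_eq, beq_iff_eq] at h1' h2 ⊢
  omega

theorem pvBeats_cotrans' (hits : List (String × String × Int)) (x y z : String)
    (h1 : pvBeats hits x y = true) (h2 : pvBeats hits z y = false) : pvBeats hits x z = true := by
  have h2' : ¬ (pvBeats hits z y = true) := by simp [h2]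
  simp only [pvBeats, Bool.or_eq_true, Bool.and_eq_true, decide_eq_true_eq, beq_iff_eq] at h1 h2' ⊢
  omega

theorem fold_emb_map_aux {α β γ : Type} (step : Option β → γ → Option β) (g : α → γ) (emb : α → β) (b : α → α → Bool)
    (hstep : ∀ m k, step (some (emb m)) (g k) = some (emb (if b k m then k else m))) :
    ∀ (rest : List α) (d : α), (rest.map g).foldl step (some (emb d)) = some (emb (pvSel b rest d)) := by
  intro rest
  induction rest with
  | nil => intro d; rfl
  | cons k rest ih =>
    intro d
    have hsel : pvSel b (k :: rest) d = pvSel b rest (if b k d then k else d) := rfl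
    rw [hsel, List.map_cons, List.foldl_cons, hstep]
    exact ih (if b k d then k else d)

theorem pvSecondPos_eq (d : PySem.Dict String (List (String × Int))) (lg : String) :
    pvSecondPos d lg = pvSp (PySem.List.sorted (d.getD lg []) (fun x => x.2)) := by
  unfold pvSecondPos pvSp
  cases hs : PySem.List.sorted (d.getD lg []) (fun x => x.2) with
  | nil => rfl
  | cons a t => cases t <;> rfl

theorem pvBestStep_some (b : String × Int × Int) (e : String × Int × List (String × Int)) :
    pvBestStep (some b) e =
      if (decide (b.2.1 < e.2.1) || (e.2.1 == b.2.1 && decide (pvSp e.2.2 < b.2.2)))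
      then some (e.1, e.2.1, pvSp e.2.2) else some b := rfl

-- ===== VERDICT (by name: the statement is the Claim_ definition above) =====
theorem choose_pair_from_hits_spec : Claim_equal_choose_pair_from_hits := by
  intro hits league_hint _hdom
  unfold Spec_choose_pair_from_hits
  unfold choose_pair_from_hits choose_pair_from_hits_alt
  by_cases hlen : hits.length < 2
  · simp [hlen]
  · simp only [if_neg hlen]
    have hne : hits ≠ [] := by
      intro h; rw [h] at hlen; exact hlen (by simp)
    have hnodup := nodup_keys_groupA hits
    have hkeys := keys_stats_eq hits
    have hKne := keys_groupA_ne_nil hits hne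
    -- the hint-branch conditions agree
    have hc1 : (pvStats hits).contains (league_hint.getD "") = (pvGroupA hits).contains (league_hint.getD "") := by
      rw [PySem.Dict.contains_eq_decide_mem_keys, PySem.Dict.contains_eq_decide_mem_keys, hkeys]
    have hc2 : decide (2 ≤ ((pvStats hits).getD (league_hint.getD "") ((0 : Int), [])).1)
        = decide (2 ≤ ((pvGroupA hits).getD (league_hint.getD "") []).length) := by
      rw [stats_getD]
      show decide (2 ≤ pvCnt hits (league_hint.getD "")) = _
      rw [decide_eq_decide]
      simp only [pvCnt]
      omega
    rw [hc1, hc2]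
    by_cases hh : (!league_hint.getD "" == "" && (pvGroupA hits).contains (league_hint.getD "") &&
        decide (2 ≤ ((pvGroupA hits).getD (league_hint.getD "") []).length)) = true
    · rw [if_pos hh, if_pos hh, stats_getD]
      cases hs : PySem.List.sorted ((pvGroupA hits).getD (league_hint.getD "") []) (fun x => x.2) with
      | nil => rfl
      | cons a t => cases t <;> rfl
    · rw [if_neg hh, if_neg hh]
      -- else branch: counts / dominant-league selection
      rcases hKcons : (pvGroupA hits).keys with _ | ⟨k0, rest⟩
      · exact absurd hKcons hKne
      have hitems : (pvGroupA hits).items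
          = (pvGroupA hits).keys.map (fun k => (k, (pvGroupA hits).getD k [])) :=
        PySem.Dict.items_eq_map_keys _ hnodup []
      have hcounts : (List.map (fun p => (p.1, (p.2.length : Int))) (pvGroupA hits).items)
          = (pvGroupA hits).keys.map (fun k => (k, pvCnt hits k)) := by
        rw [hitems, List.map_map]; rfl
      rw [hcounts, hKcons]
      -- A side: counts nonempty, max? reduces to the first count-max league r0
      rw [if_neg (by simp)]
      rw [max?_map (pvCnt hits) k0 rest]
      simp only []
      set r0 : String := pvSel (fun a m => decide (pvCnt hits m < pvCnt hits a)) rest k0 with hr0def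
      have hr0K : r0 ∈ k0 :: rest := by
        rcases pvSel_mem (fun a m => decide (pvCnt hits m < pvCnt hits a)) rest k0 with h | h
        · rw [hr0def, h]; exact List.mem_cons_self
        · exact List.mem_cons_of_mem _ h
      have hmaxc : (PySem.Dict.mk ((k0 :: rest).map (fun k => (k, pvCnt hits k)))).getD r0 0 = pvCnt hits r0 :=
        getD_mk_map _ _ _ hr0K
      -- cnt is maximal at r0, over all keys
      have hcnt_le : ∀ y ∈ k0 :: rest, pvCnt hits y ≤ pvCnt hits r0 := by
        intro y hy
        have := pvSel_not (fun a m => decide (pvCnt hits m < pvCnt hits a))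
          (by intro x; simp)
          (by intro x y z h1 h2; simp only [decide_eq_true_eq] at *; omega)
          (by intro x y z h1 h2; simp only [decide_eq_false_iff_not, decide_eq_true_eq] at *; omega)
          rest k0 y (List.mem_cons.mp hy)
        simp only [decide_eq_false_iff_not, not_lt] at this
        exact this
      have hfirst_max := pvSel_first (fun a m => decide (pvCnt hits m < pvCnt hits a))
          (by intro x y z h1 h2; simp only [decide_eq_true_eq] at *; omega)
          (by intro x y z h1 h2; simp only [decide_eq_false_iff_not, decide_eq_true_eq] at *; omega)
          rest k0
      -- B side: the scan computes the (count, second-pos)-lexicographic first best league rB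
      have hsitems : (pvStats hits).items
          = (k0, (pvStats hits).getD k0 ((0 : Int), [])) ::
              rest.map (fun k => (k, (pvStats hits).getD k ((0 : Int), []))) := by
        rw [PySem.Dict.items_eq_map_keys _ (by rw [hkeys]; exact hnodup) ((0 : Int), ([] : List (String × Int))), hkeys, hKcons]
        rfl
      rw [hsitems, List.foldl_cons]
      have hgd1 : ((pvStats hits).getD k0 ((0 : Int), [])).1 = pvCnt hits k0 := by
        rw [stats_getD]
      have hgd2 : pvSp ((pvStats hits).getD k0 ((0 : Int), [])).2 = pvSpOf hits k0 := by
        rw [stats_getD]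
        show pvSp ((PySem.List.sorted ((pvGroupA hits).getD k0 []) (fun x => x.2)).take 2) = _
        rw [pvSp_take2, ← pvSecondPos_eq]
        rfl
      have hinit : pvBestStep none (k0, (pvStats hits).getD k0 ((0 : Int), []))
          = some (k0, pvCnt hits k0, pvSpOf hits k0) := by
        show some (k0, ((pvStats hits).getD k0 ((0 : Int), [])).1, pvSp ((pvStats hits).getD k0 ((0 : Int), [])).2) = _
        rw [hgd1, hgd2]
      rw [hinit]
      have hbstep : ∀ m k, pvBestStep (some (m, pvCnt hits m, pvSpOf hits m)) (k, (pvStats hits).getD k ((0 : Int), []))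
          = some ((fun x => (x, pvCnt hits x, pvSpOf hits x)) (if pvBeats hits k m then k else m)) := by
        intro m k
        rw [pvBestStep_some, stats_getD]
        show (if (decide (pvCnt hits m < pvCnt hits k) ||
              (pvCnt hits k == pvCnt hits m &&
                decide (pvSp ((PySem.List.sorted ((pvGroupA hits).getD k []) (fun x => x.2)).take 2) < pvSpOf hits m)))
            then some (k, pvCnt hits k, pvSp ((PySem.List.sorted ((pvGroupA hits).getD k []) (fun x => x.2)).take 2))
            else some (m, pvCnt hits m, pvSpOf hits m)) = _
        rw [pvSp_take2, ← pvSecondPos_eq]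
        have hb : (decide (pvCnt hits m < pvCnt hits k) ||
            (pvCnt hits k == pvCnt hits m && decide (pvSecondPos (pvGroupA hits) k < pvSpOf hits m)))
            = pvBeats hits k m := rfl
        rw [hb]
        by_cases hbeats : pvBeats hits k m = true
        · rw [if_pos hbeats, if_pos hbeats]
          show _ = some (k, pvCnt hits k, pvSpOf hits k)
          rw [pvSpOf, pvSecondPos_eq]
        · rw [if_neg hbeats, if_neg hbeats]
      rw [fold_emb_map_aux _ _ (fun x => (x, pvCnt hits x, pvSpOf hits x)) (pvBeats hits) hbstep rest k0]
      simp only []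
      set rB : String := pvSel (pvBeats hits) rest k0 with hrBdef
      -- rB's characteristic properties
      have hbeats_not := pvSel_not (pvBeats hits) (pvBeats_irrefl hits)
        (fun x y z => pvBeats_trans hits x y z) (fun x y z => pvBeats_cotrans hits x y z) rest k0
      have hbeats_first := pvSel_first (pvBeats hits)
        (fun x y z => pvBeats_trans hits x y z) (fun x y z => pvBeats_cotrans' hits x y z) rest k0
      have hrB_not : ∀ y ∈ k0 :: rest, pvBeats hits y rB = false := by
        intro y hy
        exact hbeats_not y (List.mem_cons.mp hy)
      -- the dominant league A picks
      set tiedP : String → Bool := fun k => pvCnt hits k == pvCnt hits r0 with htiedP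
      rw [hmaxc]
      have htiedlist : (List.map (fun kv => kv.1)
            (List.filter (fun kv => kv.2 == pvCnt hits r0) ((k0 :: rest).map (fun k => (k, pvCnt hits k)))))
          = (k0 :: rest).filter tiedP := by
        rw [List.filter_map, List.map_map, htiedP]
        simp [Function.comp_def]
      rw [htiedlist]
      have hr0tied : r0 ∈ (k0 :: rest).filter tiedP :=
        List.mem_filter.mpr ⟨hr0K, by simp [htiedP]⟩
      -- case split on the tie-count
      by_cases htl : 1 < ((k0 :: rest).filter tiedP).length
      · -- tie-break branch: dominant = first min of second_pos among tied
        rw [if_pos htl]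
        rcases htie : (k0 :: rest).filter tiedP with _ | ⟨t0, trest⟩
        · rw [htie] at hr0tied; cases hr0tied
        rw [min?_cons (fun lg => pvSecondPos (pvGroupA hits) lg) t0 trest]
        simp only []
        set dmin : String := pvSel (fun a m => decide (pvSecondPos (pvGroupA hits) a < pvSecondPos (pvGroupA hits) m)) trest t0 with hdmindef
        have hdmin_tied : dmin ∈ (k0 :: rest).filter tiedP := by
          rw [htie]
          rcases pvSel_mem (fun a m => decide (pvSecondPos (pvGroupA hits) a < pvSecondPos (pvGroupA hits) m)) trest t0 with h | h
          · rw [hdmindef, h]; exact List.mem_cons_self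
          · exact List.mem_cons_of_mem _ h
        have hdmin_K : dmin ∈ k0 :: rest := (List.mem_filter.mp hdmin_tied).1
        have hdmin_cnt : pvCnt hits dmin = pvCnt hits r0 := by
          have := (List.mem_filter.mp hdmin_tied).2
          simpa [htiedP] using this
        have hsp_le : ∀ y ∈ (k0 :: rest).filter tiedP, pvSpOf hits dmin ≤ pvSpOf hits y := by
          intro y hy
          rw [htie] at hy
          have := pvSel_not (fun a m => decide (pvSecondPos (pvGroupA hits) a < pvSecondPos (pvGroupA hits) m))
            (by intro x; simp)
            (by intro x y z h1 h2; simp only [decide_eq_true_eq] at *; omega)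
            (by intro x y z h1 h2; simp only [decide_eq_false_iff_not, decide_eq_true_eq] at *; omega)
            trest t0 y (List.mem_cons.mp hy)
          simp only [decide_eq_false_iff_not, not_lt] at this
          exact this
        -- dmin satisfies the not-beaten property
        have hdmin_not : ∀ y ∈ k0 :: rest, pvBeats hits y dmin = false := by
          intro y hy
          cases hb : pvBeats hits y dmin with
          | false => rfl
          | true =>
            exfalso
            have hyle := hcnt_le y hy
            simp only [pvBeats, Bool.or_eq_true, Bool.and_eq_true, decide_eq_true_eq, beq_iff_eq] at hb
            rcases hb with hb | ⟨hbc, hbs⟩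
            · omega
            · have hytied : y ∈ (k0 :: rest).filter tiedP :=
                List.mem_filter.mpr ⟨hy, by simp [htiedP]; omega⟩
              have := hsp_le y hytied
              omega
        -- dmin satisfies the first property (via the filter decomposition)
        have hmin_first := pvSel_first (fun a m => decide (pvSecondPos (pvGroupA hits) a < pvSecondPos (pvGroupA hits) m))
          (by intro x y z h1 h2; simp only [decide_eq_true_eq] at *; omega)
          (by intro x y z h1 h2; simp only [decide_eq_false_iff_not, decide_eq_true_eq] at *; omega)
          trest t0
        obtain ⟨pret, suft, htdec, hpret⟩ := hmin_first
        rw [← hdmindef] at htdec hpret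
        have hfilterdec : (k0 :: rest).filter tiedP = pret ++ dmin :: suft := by
          rw [htie, htdec]
        obtain ⟨l1, l2, hKsplit, hf1, hf2⟩ := List.filter_eq_append_iff.mp hfilterdec
        obtain ⟨l2a, l2b, hl2, hl2a, hpd, hl2b⟩ := List.filter_eq_cons_iff.mp hf2
        -- dmin beats everything before it
        have hbA : ∀ y ∈ l1 ++ l2a, pvBeats hits dmin y = true := by
          intro y hy
          have hyK : y ∈ k0 :: rest := by
            rw [hKsplit, hl2]
            rcases List.mem_append.mp hy with h | h
            · exact List.mem_append_left _ h
            · exact List.mem_append_right _ (List.mem_append_left _ h)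
          have hyle : pvCnt hits y ≤ pvCnt hits r0 := hcnt_le y hyK
          have hnt : ¬ tiedP y = true → pvBeats hits dmin y = true := by
            intro hpy
            have hyne : ¬ pvCnt hits y = pvCnt hits r0 := by
              rw [htiedP] at hpy; simpa using hpy
            simp only [pvBeats, Bool.or_eq_true, Bool.and_eq_true, decide_eq_true_eq, beq_iff_eq]
            omega
          rcases List.mem_append.mp hy with h | h
          · by_cases hpy : tiedP y = true
            · have hyp : y ∈ pret := by
                rw [← hf1]; exact List.mem_filter.mpr ⟨h, hpy⟩
              have hsp1 : pvSpOf hits dmin < pvSpOf hits y := by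
                have := hpret y hyp
                simp only [decide_eq_true_eq] at this
                exact this
              have hyc : pvCnt hits y = pvCnt hits r0 := by
                rw [htiedP] at hpy; simpa using hpy
              simp only [pvBeats, Bool.or_eq_true, Bool.and_eq_true, decide_eq_true_eq, beq_iff_eq]
              omega
            · exact hnt hpy
          · exact hnt (hl2a y h)
        obtain ⟨preB, sufB, hLB, hbB⟩ := hbeats_first
        have hdomeq : dmin = rB := by
          refine pvSel_unique (pvBeats hits) (k0 :: rest) dmin rB (l1 ++ l2a) l2b preB sufB
            ?_ hLB hdmin_not hrB_not hbA hbB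
          rw [hKsplit, hl2, List.append_assoc]
        rw [← hdomeq, stats_getD]
        by_cases hq : 2 ≤ ((pvGroupA hits).getD dmin []).length
        · rw [if_pos hq, if_pos (show (2 : Int) ≤ pvCnt hits dmin by unfold pvCnt; omega)]
          cases hs : PySem.List.sorted ((pvGroupA hits).getD dmin []) (fun x => x.2) with
          | nil => rfl
          | cons a t => cases t <;> rfl
        · rw [if_neg hq, if_neg (show ¬ (2 : Int) ≤ pvCnt hits dmin by unfold pvCnt; omega)]
      · -- no tie-break: the dominant league is the first count-max league r0
        rw [if_neg htl]
        have htied1 : List.filter tiedP (k0 :: rest) = [r0] := by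
          rcases hft : List.filter tiedP (k0 :: rest) with _ | ⟨a, _ | ⟨b, t⟩⟩
          · rw [hft] at hr0tied; cases hr0tied
          · rw [hft] at hr0tied
            rcases List.mem_singleton.mp hr0tied with rfl
            rfl
          · exfalso; rw [hft] at htl; exact htl (by simp)
        have hr0_not : ∀ y ∈ k0 :: rest, pvBeats hits y r0 = false := by
          intro y hy
          cases hb : pvBeats hits y r0 with
          | false => rfl
          | true =>
            exfalso
            have hyle := hcnt_le y hy
            simp only [pvBeats, Bool.or_eq_true, Bool.and_eq_true, decide_eq_true_eq, beq_iff_eq] at hb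
            rcases hb with hb | ⟨hbc, hbs⟩
            · omega
            · have hytied : y ∈ List.filter tiedP (k0 :: rest) :=
                List.mem_filter.mpr ⟨hy, by rw [htiedP]; simpa using hbc⟩
              rw [htied1] at hytied
              rcases List.mem_singleton.mp hytied with rfl
              omega
        obtain ⟨preA, sufA, hLA, hbA0⟩ := hfirst_max
        rw [← hr0def] at hLA hbA0
        have hbA : ∀ y ∈ preA, pvBeats hits r0 y = true := by
          intro y hy
          have := hbA0 y hy
          simp only [decide_eq_true_eq] at this
          simp only [pvBeats, Bool.or_eq_true, Bool.and_eq_true, decide_eq_true_eq, beq_iff_eq]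
          omega
        obtain ⟨preB, sufB, hLB, hbB⟩ := hbeats_first
        have hdomeq : r0 = rB :=
          pvSel_unique (pvBeats hits) (k0 :: rest) r0 rB preA sufA preB sufB
            hLA hLB hr0_not hrB_not hbA hbB
        rw [← hdomeq, stats_getD]
        by_cases hq : 2 ≤ ((pvGroupA hits).getD r0 []).length
        · rw [if_pos hq, if_pos (show (2 : Int) ≤ pvCnt hits r0 by unfold pvCnt; omega)]
          cases hs : PySem.List.sorted ((pvGroupA hits).getD r0 []) (fun x => x.2) with
          | nil => rfl
          | cons a t => cases t <;> rfl
        · rw [if_neg hq, if_neg (show ¬ (2 : Int) ≤ pvCnt hits r0 by unfold pvCnt; omega)]
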